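-- pv_equiv track=rewrite | github.com/pypi-data/pypi-mirror-401 | packages/ssm-connect/ssm_connect-1.5.0.tar.gz/ssm_connect-1.5.0/src/ssm_connect/inventory.py | filter_instances_by_keywords
-- ===== SOURCE A (Python) =====
-- from typing import Optional, List, Dict
--
-- def filter_instances_by_keywords(instances: List[Dict[str, str]], keywords: Optional[List[str]]) -> List[Dict[str, str]]:
--     if not keywords:
--         return instances
--     filtered = []
--     for inst in instances:
--         search_blob = (
--             inst.get("Name", "").lower() + " " +
--             inst.get("InstanceId", "").lower() + " " +
--             inst.get("AllTagsBlob", "")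
--         )
--         if all(kw in search_blob for kw in keywords):
--             filtered.append(inst)
--     return filtered
-- ===== SOURCE B (Python) =====
-- def filter_instances_by_keywords(instances, keywords):
--     if not keywords:
--         return instances
--     survivors = [
--         (inst,
--          inst.get("Name", "").lower() + " " +
--          inst.get("InstanceId", "").lower() + " " +
--          inst.get("AllTagsBlob", ""))
--         for inst in instances
--     ]
--     for kw in keywords:
--         survivors = [p for p in survivors if kw in p[1]]
--     return [inst for inst, _ in survivors]
-- ===== Notes on version B (the rewrite author's own statement) =====
-- stated objective: alternative
-- what changed: Instead of one pass over instances testing all keywords per instance, B precomputes (instance, blob) pairs once and then loops over keywords, shrinking the surviving candidate list keyword by keyword; order is preserved by the list structure.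
import Mathlib
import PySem

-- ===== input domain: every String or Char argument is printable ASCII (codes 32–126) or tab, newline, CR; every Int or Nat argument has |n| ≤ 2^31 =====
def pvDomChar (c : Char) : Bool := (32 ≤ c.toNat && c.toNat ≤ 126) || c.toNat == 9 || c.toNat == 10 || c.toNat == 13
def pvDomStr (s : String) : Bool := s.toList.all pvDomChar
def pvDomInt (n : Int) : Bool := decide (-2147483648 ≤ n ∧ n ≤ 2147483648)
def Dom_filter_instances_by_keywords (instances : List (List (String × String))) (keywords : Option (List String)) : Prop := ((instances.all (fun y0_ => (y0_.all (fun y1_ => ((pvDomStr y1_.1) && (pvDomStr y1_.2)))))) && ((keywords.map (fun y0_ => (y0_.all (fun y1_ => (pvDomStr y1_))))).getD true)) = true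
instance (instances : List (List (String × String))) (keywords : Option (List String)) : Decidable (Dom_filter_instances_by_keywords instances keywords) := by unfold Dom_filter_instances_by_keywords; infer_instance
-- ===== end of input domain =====

-- B restructures A's single instance-loop (all keywords tested per instance) into: build (instance, blob)
-- pairs once, then shrink the surviving pair list keyword by keyword; same return value, 'alternative' objective.

-- ===== PORT A =====
-- inst.get(k, "") on a Python dict, first-match lookup on the association list
def pvDictGetD (inst : List (String × String)) (k : String) : String :=
  match inst.find? (fun p => p.1 == k) with
  | some p => p.2
  | none => ""

-- the search blob, as a list of chars (Python string concatenation, exact)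
def pvSearchBlob (inst : List (String × String)) : List Char :=
  PySem.Chars.lower (pvDictGetD inst "Name").toList ++ [' '] ++
  PySem.Chars.lower (pvDictGetD inst "InstanceId").toList ++ [' '] ++
  (pvDictGetD inst "AllTagsBlob").toList

def filter_instances_by_keywords (instances : List (List (String × String))) (keywords : Option (List String)) : List (List (String × String)) :=
  match keywords with
  | none => instances          -- 'if not keywords'
  | some [] => instances
  | some kws =>
    instances.foldl (fun filtered inst =>
      let search_blob := pvSearchBlob inst
      if kws.all (fun kw => PySem.Chars.isIn kw.toList search_blob) then filtered ++ [inst]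
      else filtered) []

-- ===== PORT B =====
def filter_instances_by_keywords_alt (instances : List (List (String × String))) (keywords : Option (List String)) : List (List (String × String)) :=
  match keywords with
  | some (k :: rest) =>
    let survivors := instances.map (fun inst => (inst, pvSearchBlob inst))
    let survivors := (k :: rest).foldl (fun ps kw => ps.filter (fun p => PySem.Chars.isIn kw.toList p.2)) survivors
    survivors.map (·.1)
  | _ => instances             -- 'if not keywords: return instances'

-- ===== PRECONDITION & SPEC =====
def Spec_filter_instances_by_keywords (instances : List (List (String × String))) (keywords : Option (List String)) (out : List (List (String × String))) : Prop := out = filter_instances_by_keywords_alt instances keywords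
instance (instances : List (List (String × String))) (keywords : Option (List String)) (out : List (List (String × String))) : Decidable (Spec_filter_instances_by_keywords instances keywords out) := by unfold Spec_filter_instances_by_keywords; infer_instance

-- ===== CLAIM (what is proved, stated in full; the proofs are below) =====
def Claim_equal_filter_instances_by_keywords : Prop := ∀ (instances : List (List (String × String))) (keywords : Option (List String)), Dom_filter_instances_by_keywords instances keywords → Spec_filter_instances_by_keywords instances keywords (filter_instances_by_keywords instances keywords)

-- ===== LEMMAS AND PROOFS =====

-- folding filters over the keyword list = one filter by the conjunction
theorem foldl_filter_eq_filter_all {α β : Type} (pred : β → α → Bool) (kws : List β) (ps : List α) :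
    kws.foldl (fun acc kw => acc.filter (pred kw)) ps = ps.filter (fun p => kws.all (fun kw => pred kw p)) := by
  induction kws generalizing ps with
  | nil => simp
  | cons k rest ih =>
    simp only [List.foldl_cons, ih, List.filter_filter, List.all_cons]
    congr 1
    funext p
    rw [Bool.and_comm]

theorem filter_instances_by_keywords_spec : Claim_equal_filter_instances_by_keywords := by
  intro instances keywords _
  unfold Spec_filter_instances_by_keywords filter_instances_by_keywords filter_instances_by_keywords_alt
  match keywords with
  | none => rfl
  | some [] => rfl
  | some (k :: rest) =>
    simp only [foldl_filter_eq_filter_all, List.filter_map, List.map_map]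
    rw [PySem.List.foldl_append_if_eq_filter]
    simp [Function.comp_def]
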